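-- pv_equiv track=rewrite | github.com/dmh-cs/wp-preprocessing-el | src/iobes.py | _insert_link_titles_and_tokens
-- ===== SOURCE A (Python) =====
-- def _insert_link_titles_and_tokens(iobes_sequence, mention_link_titles, tokens):
--   with_link_titles = []
--   mention_ctr = 0
--   for token, iobes in zip(tokens, iobes_sequence):
--     row = []
--     row.append(iobes)
--     row.append(token)
--     if iobes != 'O':
--       row.append(mention_link_titles[mention_ctr])
--       if iobes == 'S' or iobes == 'E':
--         mention_ctr += 1
--     with_link_titles.append(row)
--   return with_link_titles
-- ===== SOURCE B (Python) =====
-- def _insert_link_titles_and_tokens(iobes_sequence, mention_link_titles, tokens):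
--   n = min(len(tokens), len(iobes_sequence))
--   # Pass 1: mention-index table; index[i] = number of 'S'/'E' tags strictly before i.
--   index = []
--   c = 0
--   for i in range(n):
--     index.append(c)
--     if iobes_sequence[i] == 'S' or iobes_sequence[i] == 'E':
--       c += 1
--   # Pass 2: build the rows, looking mentions up through the precomputed table.
--   return [[iobes_sequence[i], tokens[i]] +
--           ([mention_link_titles[index[i]]] if iobes_sequence[i] != 'O' else [])
--           for i in range(n)]
-- ===== Notes on version B (the rewrite author's own statement) =====
-- stated objective: alternative
-- what changed: Replaces the single fold with a live mention counter by two passes: a precomputed prefix-sum mention-index table, then an index-based comprehension that builds each row by direct lookup.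
import Mathlib
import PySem

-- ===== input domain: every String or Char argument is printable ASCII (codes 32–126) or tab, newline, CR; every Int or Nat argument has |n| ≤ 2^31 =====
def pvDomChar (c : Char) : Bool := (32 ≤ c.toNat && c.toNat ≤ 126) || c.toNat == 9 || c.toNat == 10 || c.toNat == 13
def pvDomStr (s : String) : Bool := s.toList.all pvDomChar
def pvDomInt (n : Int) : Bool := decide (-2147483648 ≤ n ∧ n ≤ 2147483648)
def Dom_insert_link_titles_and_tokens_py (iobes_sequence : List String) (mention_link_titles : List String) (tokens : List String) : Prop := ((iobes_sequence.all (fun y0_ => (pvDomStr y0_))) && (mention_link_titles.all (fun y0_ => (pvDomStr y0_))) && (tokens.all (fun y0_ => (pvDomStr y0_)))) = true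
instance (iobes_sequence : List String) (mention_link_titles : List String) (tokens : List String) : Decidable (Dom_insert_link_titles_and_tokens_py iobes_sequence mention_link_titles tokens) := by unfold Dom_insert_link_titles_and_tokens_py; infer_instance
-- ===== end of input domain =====

-- B builds the rows in two passes — a prefix-sum mention-index table, then an index-based
-- comprehension — instead of A's single fold with a live counter (alternative decomposition,
-- same cost). Pre_ excludes inputs where A raises IndexError (too few mention link titles).

-- ===== PORT A =====
-- single pass over zip(tokens, iobes) carrying (rows so far, mention counter); pvStepA is the loop body
def pvStepA (mention_link_titles : List String) (st : List (List String) × Nat) (ti : String × String) : List (List String) × Nat :=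
  let row := [ti.2, ti.1]
  if ti.2 ≠ "O" then
    let row := row ++ [mention_link_titles.getD st.2 ""]   -- Python raises here when out of range; excluded by Pre_
    let ctr := if ti.2 = "S" ∨ ti.2 = "E" then st.2 + 1 else st.2
    (st.1 ++ [row], ctr)
  else
    (st.1 ++ [row], st.2)

def insert_link_titles_and_tokens_py (iobes_sequence : List String) (mention_link_titles : List String) (tokens : List String) : List (List String) :=
  ((tokens.zip iobes_sequence).foldl (pvStepA mention_link_titles) ([], 0)).1

-- ===== PORT B =====
def insert_link_titles_and_tokens_py_alt (iobes_sequence : List String) (mention_link_titles : List String) (tokens : List String) : List (List String) :=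
  let n := min tokens.length iobes_sequence.length
  -- pass 1: mention-index table (prefix counts of 'S'/'E')
  let index := ((List.range n).foldl
    (fun (st : List Nat × Nat) i =>
      (st.1 ++ [st.2],
       if iobes_sequence.getD i "" = "S" ∨ iobes_sequence.getD i "" = "E" then st.2 + 1 else st.2))
    ([], 0)).1
  -- pass 2: rows via direct table lookup
  (List.range n).map (fun i =>
    [iobes_sequence.getD i "", tokens.getD i ""] ++
      (if iobes_sequence.getD i "" ≠ "O" then [mention_link_titles.getD (index.getD i 0) ""] else []))

-- ===== PRECONDITION & SPEC =====
-- Pre_ excludes exactly the inputs where Python A raises IndexError: a non-'O' tag at zipped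
-- position i whose mention index (count of 'S'/'E' tags strictly before i) is past the end of
-- mention_link_titles.  (Python B raises IndexError there too.)
def Pre_insert_link_titles_and_tokens_py (iobes_sequence : List String) (mention_link_titles : List String) (tokens : List String) : Prop :=
  ∀ i, i < min tokens.length iobes_sequence.length →
    iobes_sequence.getD i "" ≠ "O" →
    ((iobes_sequence.take i).filter (fun s => s = "S" ∨ s = "E")).length < mention_link_titles.length
instance (iobes_sequence : List String) (mention_link_titles : List String) (tokens : List String) : Decidable (Pre_insert_link_titles_and_tokens_py iobes_sequence mention_link_titles tokens) := by unfold Pre_insert_link_titles_and_tokens_py; infer_instance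

def pvWitness_insert_link_titles_and_tokens_py : List String × List String × List String :=
  (["B", "E", "O", "S"], ["Paris", "Rome"], ["new", "york", "and", "paris"])

def Spec_insert_link_titles_and_tokens_py (iobes_sequence : List String) (mention_link_titles : List String) (tokens : List String) (out : List (List String)) : Prop := out = insert_link_titles_and_tokens_py_alt iobes_sequence mention_link_titles tokens
instance (iobes_sequence : List String) (mention_link_titles : List String) (tokens : List String) (out : List (List String)) : Decidable (Spec_insert_link_titles_and_tokens_py iobes_sequence mention_link_titles tokens out) := by unfold Spec_insert_link_titles_and_tokens_py; infer_instance

-- ===== CLAIM (what is proved, stated in full; the proofs are below) =====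
def Claim_equal_insert_link_titles_and_tokens_py : Prop := ∀ (iobes_sequence : List String) (mention_link_titles : List String) (tokens : List String), Dom_insert_link_titles_and_tokens_py iobes_sequence mention_link_titles tokens → Pre_insert_link_titles_and_tokens_py iobes_sequence mention_link_titles tokens → Spec_insert_link_titles_and_tokens_py iobes_sequence mention_link_titles tokens (insert_link_titles_and_tokens_py iobes_sequence mention_link_titles tokens)

-- ===== LEMMAS AND PROOFS =====

-- count of 'S'/'E' among the first i tags
def pvCnt (iobes : List String) (i : Nat) : Nat :=
  ((iobes.take i).filter (fun s => s = "S" ∨ s = "E")).length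

-- recursive characterisation of A's pass
def pvGo (mlt : List String) : List (String × String) → Nat → List (List String)
  | [], _ => []
  | (t, io) :: rest, c =>
    if io ≠ "O" then
      [io, t, mlt.getD c ""] :: pvGo mlt rest (if io = "S" ∨ io = "E" then c + 1 else c)
    else
      [io, t] :: pvGo mlt rest c

theorem pvA_fold (mlt : List String) (zs : List (String × String))
    (acc : List (List String)) (c : Nat) :
    ((zs.foldl (pvStepA mlt) (acc, c)).1 = acc ++ pvGo mlt zs c) := by
  induction zs generalizing acc c with
  | nil => simp [pvGo]
  | cons hd tl ih =>
    obtain ⟨t, io⟩ := hd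
    rw [List.foldl_cons]
    by_cases h : io = "O"
    · simp [pvStepA, pvGo, h, ih]
    · simp [pvStepA, pvGo, h, ih]

theorem pvCnt_zero (iobes : List String) : pvCnt iobes 0 = 0 := by simp [pvCnt]

theorem pvCnt_cons_succ (io : String) (ios : List String) (i : Nat) :
    pvCnt (io :: ios) (i + 1) =
      (if io = "S" ∨ io = "E" then 1 else 0) + pvCnt ios i := by
  by_cases h : io = "S" ∨ io = "E" <;> simp [pvCnt, h] <;> omega

theorem pvCnt_succ (iobes : List String) (i : Nat) (h : i < iobes.length) :
    pvCnt iobes (i + 1) =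
      (if iobes.getD i "" = "S" ∨ iobes.getD i "" = "E" then pvCnt iobes i + 1 else pvCnt iobes i) := by
  induction iobes generalizing i with
  | nil => simp at h
  | cons io ios ih =>
    cases i with
    | zero => by_cases hc : io = "S" ∨ io = "E" <;> simp [pvCnt, hc]
    | succ j =>
      have hj : j < ios.length := by simpa using h
      rw [pvCnt_cons_succ]
      have := ih j hj
      by_cases hc : io = "S" ∨ io = "E" <;>
        simp [pvCnt_cons_succ, List.getD, this] <;> split_ifs <;> omega

-- B's index-table fold computes (range n).map (pvCnt iobes); the final counter is pvCnt iobes m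
theorem pvIndex_fold (iobes : List String) (m : Nat) (hm : m ≤ iobes.length) :
    ((List.range m).foldl
      (fun (st : List Nat × Nat) i =>
        (st.1 ++ [st.2],
         if iobes.getD i "" = "S" ∨ iobes.getD i "" = "E" then st.2 + 1 else st.2))
      ([], 0)) = ((List.range m).map (pvCnt iobes), pvCnt iobes m) := by
  induction m with
  | zero => simp [pvCnt_zero]
  | succ k ih =>
    have hk : k ≤ iobes.length := Nat.le_of_succ_le hm
    rw [List.range_succ, List.foldl_append, ih hk]
    simp [pvCnt_succ iobes k (Nat.lt_of_lt_of_le (Nat.lt_succ_self k) hm)]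

-- pvGo equals the index-based comprehension form (with counter offset c)
theorem pvGo_eq (mlt : List String) (iobes toks : List String) (c : Nat) :
    pvGo mlt (toks.zip iobes) c =
      (List.range (min toks.length iobes.length)).map (fun i =>
        [iobes.getD i "", toks.getD i ""] ++
          (if iobes.getD i "" ≠ "O" then [mlt.getD (c + pvCnt iobes i) ""] else [])) := by
  induction iobes generalizing toks c with
  | nil => simp [pvGo]
  | cons io ios ih =>
    cases toks with
    | nil => simp [pvGo]
    | cons t ts =>
      have hmin : min (t :: ts).length (io :: ios).length = min ts.length ios.length + 1 := by
        simp [List.length_cons]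
      rw [List.zip_cons_cons, hmin, List.range_succ_eq_map, List.map_cons, List.map_map]
      by_cases h : io = "O"
      · have hc : ¬ (io = "S" ∨ io = "E") := by simp [h]
        simp only [pvGo, h]
        rw [ih ts c]
        simp [Function.comp, pvCnt_cons_succ, hc, h]
      · simp only [pvGo, if_pos h]
        rw [ih ts]
        by_cases hc : io = "S" ∨ io = "E"
        · simp [Function.comp, pvCnt_zero, pvCnt_cons_succ, hc, h, Nat.add_comm, Nat.add_assoc,
            Nat.add_left_comm]
        · simp [Function.comp, pvCnt_zero, pvCnt_cons_succ, hc, h]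

theorem pv_ports_eq (iobes mlt toks : List String) :
    insert_link_titles_and_tokens_py iobes mlt toks =
      insert_link_titles_and_tokens_py_alt iobes mlt toks := by
  unfold insert_link_titles_and_tokens_py insert_link_titles_and_tokens_py_alt
  rw [pvA_fold, pvGo_eq]
  simp only [pvIndex_fold iobes (min toks.length iobes.length) (Nat.min_le_right _ _),
    List.nil_append]
  apply List.map_congr_left
  intro i hi
  have hi' : i < min toks.length iobes.length := List.mem_range.mp hi
  simp [List.getD_eq_getElem?_getD, List.getElem?_range hi']

-- ===== VERDICT (by name: the statement is the Claim_ definition above) =====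
theorem insert_link_titles_and_tokens_py_spec : Claim_equal_insert_link_titles_and_tokens_py := by
  intro iobes mlt toks _ _
  unfold Spec_insert_link_titles_and_tokens_py
  exact pv_ports_eq iobes mlt toks
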